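-- pv_equiv track=rewrite | github.com/mikmark95/InvoiceReader | src/utils.py | genera_nome_file
-- ===== SOURCE A (Python) =====
-- def genera_nome_file(tipologia, numero_fattura, data_fattura, denominazione, stagione, anno, genere, generico=False):
--     """
--     Genera un nome file standardizzato per la fattura in base ai parametri forniti.
--
--     Crea un nome file che include tutte le informazioni rilevanti della fattura
--     e rimuove eventuali caratteri non validi per i nomi file.
--
--     Args:
--         tipologia (str): Tipo di documento (es. "FATT" per fattura, "NC" per nota di credito)
--         numero_fattura (str): Numero identificativo della fattura
--         data_fattura (str): Data della fattura nel formato "GG-MM-AAAA"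
--         denominazione (str): Nome del fornitore
--         stagione (str): Stagione di riferimento (es. "PE", "AI", "CONTINUATIVO")
--         anno (str): Anno di riferimento
--         genere (str): Genere di riferimento (es. "UOMO", "DONNA")
--         generico (bool, optional): Se True, usa un formato semplificato. Default False.
--
--     Returns:
--         str: Nome file standardizzato con estensione .pdf
--     """
--     if generico:
--         nome = f"{denominazione} {numero_fattura} DEL {data_fattura}.pdf"
--     else:
--         nome = f"{tipologia} {numero_fattura} DEL {data_fattura} {denominazione} {stagione} {anno} {genere}.pdf"
--
--     caratteri_non_validi = r'<>:"/\\|?*'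
--     for c in caratteri_non_validi:
--         nome = nome.replace(c, "")
--     return nome
-- ===== SOURCE B (Python) =====
-- def genera_nome_file(tipologia, numero_fattura, data_fattura, denominazione, stagione, anno, genere, generico=False):
--     invalid = '<>:"/\\|?*'
--
--     def pulisci(s):
--         return ''.join(ch for ch in s if ch not in invalid)
--
--     if generico:
--         parti = [denominazione, numero_fattura, "DEL", data_fattura]
--     else:
--         parti = [tipologia, numero_fattura, "DEL", data_fattura,
--                  denominazione, stagione, anno, genere]
--     return ' '.join(pulisci(p) for p in parti) + ".pdf"
-- ===== Notes on version B (the rewrite author's own statement) =====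
-- stated objective: alternative
-- what changed: Instead of building the full name and scanning it once per invalid character with repeated str.replace calls, B sanitizes each field separately with a single membership-filtered pass and assembles the name with ' '.join over the list of cleaned parts plus the '.pdf' suffix (correct because the separators and suffix contain no invalid characters, so per-field filtering then joining equals filtering the joined string).
import Mathlib
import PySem

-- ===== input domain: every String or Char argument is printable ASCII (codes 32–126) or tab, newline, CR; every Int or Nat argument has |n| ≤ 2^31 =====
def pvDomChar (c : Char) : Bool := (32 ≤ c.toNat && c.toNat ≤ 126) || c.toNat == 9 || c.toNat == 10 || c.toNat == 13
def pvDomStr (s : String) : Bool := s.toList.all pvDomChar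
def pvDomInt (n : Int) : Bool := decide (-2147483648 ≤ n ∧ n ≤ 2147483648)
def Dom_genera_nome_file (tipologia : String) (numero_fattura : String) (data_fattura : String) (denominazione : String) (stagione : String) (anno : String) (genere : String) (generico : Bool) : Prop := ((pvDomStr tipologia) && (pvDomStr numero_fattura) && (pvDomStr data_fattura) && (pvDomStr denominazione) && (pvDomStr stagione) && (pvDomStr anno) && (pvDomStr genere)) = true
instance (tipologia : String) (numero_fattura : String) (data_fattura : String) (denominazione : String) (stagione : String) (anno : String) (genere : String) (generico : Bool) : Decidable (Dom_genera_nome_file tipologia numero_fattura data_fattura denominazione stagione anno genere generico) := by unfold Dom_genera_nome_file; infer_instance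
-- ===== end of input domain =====

-- B sanitizes each field separately with one filtered pass and assembles the name with ' '.join over the cleaned parts, instead of A's per-invalid-character str.replace loop over the full name (alternative decomposition, same result).
-- ===== PORT A =====
def genera_nome_file (tipologia : String) (numero_fattura : String) (data_fattura : String) (denominazione : String) (stagione : String) (anno : String) (genere : String) (generico : Bool) : String :=
  let nome : String :=
    if generico then
      denominazione ++ " " ++ numero_fattura ++ " DEL " ++ data_fattura ++ ".pdf"
    else
      tipologia ++ " " ++ numero_fattura ++ " DEL " ++ data_fattura ++ " " ++ denominazione ++ " " ++ stagione ++ " " ++ anno ++ " " ++ genere ++ ".pdf"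
  -- r'<>:"/\\|?*' contains the backslash twice; the port keeps the duplicate.
  let caratteri_non_validi : String := "<>:\"/\\\\|?*"
  caratteri_non_validi.toList.foldl (fun n c => PySem.Str.replace n (String.ofList [c]) "") nome

-- ===== PORT B =====
def pvInvalid : List Char := "<>:\"/\\|?*".toList

def pvPulisci (s : String) : String :=
  String.ofList (s.toList.filter (fun ch => !(pvInvalid.contains ch)))

def genera_nome_file_alt (tipologia : String) (numero_fattura : String) (data_fattura : String) (denominazione : String) (stagione : String) (anno : String) (genere : String) (generico : Bool) : String :=
  let parti : List String :=
    if generico then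
      [denominazione, numero_fattura, "DEL", data_fattura]
    else
      [tipologia, numero_fattura, "DEL", data_fattura, denominazione, stagione, anno, genere]
  PySem.Str.join " " (parti.map pvPulisci) ++ ".pdf"

-- ===== PRECONDITION & SPEC =====
def Spec_genera_nome_file (tipologia : String) (numero_fattura : String) (data_fattura : String) (denominazione : String) (stagione : String) (anno : String) (genere : String) (generico : Bool) (out : String) : Prop := out = genera_nome_file_alt tipologia numero_fattura data_fattura denominazione stagione anno genere generico
instance (tipologia : String) (numero_fattura : String) (data_fattura : String) (denominazione : String) (stagione : String) (anno : String) (genere : String) (generico : Bool) (out : String) : Decidable (Spec_genera_nome_file tipologia numero_fattura data_fattura denominazione stagione anno genere generico out) := by unfold Spec_genera_nome_file; infer_instance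

-- ===== CLAIM (what is proved, stated in full; the proofs are below) =====
def Claim_equal_genera_nome_file : Prop := ∀ (tipologia : String) (numero_fattura : String) (data_fattura : String) (denominazione : String) (stagione : String) (anno : String) (genere : String) (generico : Bool), Dom_genera_nome_file tipologia numero_fattura data_fattura denominazione stagione anno genere generico → Spec_genera_nome_file tipologia numero_fattura data_fattura denominazione stagione anno genere generico (genera_nome_file tipologia numero_fattura data_fattura denominazione stagione anno genere generico)

-- ===== LEMMAS AND PROOFS =====
-- str.replace with a single-character pattern and empty replacement deletes every occurrence of that char.
lemma replace_go_single (c : Char) : ∀ (fuel : Nat) (l acc : List Char), l.length ≤ fuel →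
    PySem.Chars.replace.go [c] [] fuel l acc = acc.reverse ++ l.filter (· ≠ c) := by
  intro fuel
  induction fuel with
  | zero =>
    intro l acc h
    have : l = [] := List.eq_nil_of_length_eq_zero (Nat.le_zero.mp h)
    subst this; simp [PySem.Chars.replace.go]
  | succ n ih =>
    intro l acc h
    cases l with
    | nil => simp [PySem.Chars.replace.go]
    | cons x t =>
      by_cases hx : x = c
      · subst hx
        have hp : List.isPrefixOf [x] (x :: t) = true := by simp [List.isPrefixOf]
        simp only [PySem.Chars.replace.go, hp, if_pos, List.length_cons, List.length_nil,
          List.drop_succ_cons, List.drop_zero, List.reverse_nil, List.nil_append]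
        rw [ih t acc (by simpa using Nat.le_of_succ_le_succ h)]
        simp
      · have hp : List.isPrefixOf [c] (x :: t) = false := by
          simp [List.isPrefixOf]; exact fun hc => hx hc.symm
        simp only [PySem.Chars.replace.go, hp, Bool.false_eq_true, if_false]
        rw [ih t (x :: acc) (by simpa using Nat.le_of_succ_le_succ h)]
        simp [hx]

lemma replace_single (c : Char) (l : List Char) :
    PySem.Chars.replace l [c] [] = l.filter (· ≠ c) := by
  simp only [PySem.Chars.replace, List.isEmpty_cons, Bool.false_eq_true, if_false]
  simpa using replace_go_single c l.length l [] (le_refl _)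

-- Folding single-char deletions over cs equals one filtered pass removing every char of cs.
lemma foldl_replace (cs : List Char) : ∀ s : String,
    cs.foldl (fun n c => PySem.Str.replace n (String.ofList [c]) "") s
      = String.ofList (s.toList.filter (fun ch => !(cs.contains ch))) := by
  induction cs with
  | nil => intro s; simp
  | cons c cs ih =>
    intro s
    rw [List.foldl_cons, ih]
    congr 1
    simp only [PySem.Str.replace]
    rw [show (String.ofList [c]).toList = [c] by simp,
        show ("" : String).toList = [] by rfl]
    rw [replace_single]
    simp only [String.toList_ofList, List.filter_filter]
    apply List.filter_congr
    intro ch _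
    by_cases h : ch = c <;> simp [h]

-- A's 10-char invalid string (duplicated backslash) keeps the same characters as B's 9-char one.
lemma filter_keep (l : List Char) :
    l.filter (fun ch => !(("<>:\"/\\\\|?*".toList).contains ch))
      = l.filter (fun ch => !(pvInvalid.contains ch)) := by
  apply List.filter_congr
  intro ch _
  congr 1
  simp only [pvInvalid, List.contains_eq_mem, decide_eq_decide]
  constructor <;> intro h <;> simp_all

-- pvPulisci keeps the allowed characters of one part.
lemma toList_pvPulisci (s : String) :
    (pvPulisci s).toList = s.toList.filter (fun ch => !(pvInvalid.contains ch)) := by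
  simp [pvPulisci]

-- ===== VERDICT (by name: the statement is the Claim_ definition above) =====
theorem genera_nome_file_spec : Claim_equal_genera_nome_file := by
  intro tipologia numero_fattura data_fattura denominazione stagione anno genere generico _
  unfold Spec_genera_nome_file genera_nome_file genera_nome_file_alt
  rw [foldl_replace, filter_keep]
  apply String.toList_inj.mp
  cases generico <;>
    simp [PySem.Str.join, PySem.Chars.join, List.intercalate, List.intersperse,
      toList_pvPulisci, List.filter_append, pvInvalid]
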